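-- pv_equiv track=rewrite | github.com/AlexC1991/VoxAI_IDE | core/agent_tools_edit.py | _common_indent
-- ===== SOURCE A (Python) =====
-- def _common_indent(text):
--     indents = []
--     for line in str(text or '').splitlines():
--         if not line.strip():
--             continue
--         stripped = line.lstrip(' \t')
--         indents.append(line[:len(line) - len(stripped)])
--     if not indents:
--         return ''
--     prefix = indents[0]
--     for indent in indents[1:]:
--         while prefix and not indent.startswith(prefix):
--             prefix = prefix[:-1]
--         if not prefix:
--             break
--     return prefix
-- ===== SOURCE B (Python) =====
-- def _common_indent(text):
--     src = str(text or '')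
--     indents = [line[:len(line) - len(line.lstrip(' \t'))]
--                for line in src.splitlines() if line.strip()]
--     if not indents:
--         return ''
--     first = indents[0]
--     i = 0
--     while i < len(first) and all(len(ind) > i and ind[i] == first[i] for ind in indents):
--         i += 1
--     return first[:i]
-- ===== Notes on version B (the rewrite author's own statement) =====
-- stated objective: alternative
-- what changed: replaced A's pairwise prefix-shrinking loop (repeatedly chopping the last character until each indent starts with the prefix) by a single column-wise scan that advances a character index while every indent agrees with the first indent at that column, and collected the indents with a comprehension instead of an accumulator loop
import Mathlib
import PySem

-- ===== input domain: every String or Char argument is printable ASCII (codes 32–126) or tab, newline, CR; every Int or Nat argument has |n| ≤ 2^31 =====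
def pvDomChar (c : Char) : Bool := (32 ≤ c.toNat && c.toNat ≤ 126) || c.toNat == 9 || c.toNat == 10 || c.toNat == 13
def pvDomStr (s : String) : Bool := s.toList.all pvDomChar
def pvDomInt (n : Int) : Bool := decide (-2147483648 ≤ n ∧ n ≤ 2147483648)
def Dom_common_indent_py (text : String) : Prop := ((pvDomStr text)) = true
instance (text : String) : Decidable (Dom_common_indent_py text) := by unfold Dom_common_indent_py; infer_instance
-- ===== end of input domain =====

-- B replaces A's pairwise prefix-shrinking LCP with a single column-wise scan (alternative decomposition, same exact result).

-- ===== PORT A =====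
-- line.lstrip(' \t') : drop leading ' ' and '\t' (exact port: lstrip with an explicit char set)
def pvLstripST (cs : List Char) : List Char := cs.dropWhile (fun c => c == ' ' || c == '\t')

-- the indent of a line: line[:len(line) - len(line.lstrip(' \t'))]  (a nonnegative head slice = take)
def pvIndentOf (line : String) : List Char :=
  line.toList.take (line.toList.length - (pvLstripST line.toList).length)

-- 'while prefix and not indent.startswith(prefix): prefix = prefix[:-1]'
def pvShrink (pfx ind : List Char) : List Char :=
  if pfx ≠ [] ∧ ¬ pfx.isPrefixOf ind then pvShrink pfx.dropLast ind else pfx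
termination_by pfx.length
decreasing_by
  rename_i h
  rw [List.length_dropLast]
  cases pfx with
  | nil => exact absurd rfl h.1
  | cons a as => simp

-- 'for indent in indents[1:]: prefix = shrink ...; if not prefix: break'
def pvAFold (pfx : List Char) (inds : List (List Char)) : List Char :=
  match inds with
  | [] => pfx
  | ind :: rest =>
    let p := pvShrink pfx ind
    if p = [] then p else pvAFold p rest

def common_indent_py (text : String) : String :=
  -- str(text or '') is text itself for a string argument
  let indents := (PySem.Str.splitlines text).foldl
    (fun acc line => if PySem.Str.strip line == "" then acc else acc ++ [pvIndentOf line]) []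
  match indents with
  | [] => ""
  | first :: rest => String.ofList (pvAFold first rest)

-- ===== PORT B =====
-- 'while i < len(first) and all(len(ind) > i and ind[i] == first[i] for ind in indents): i += 1'
def pvColScan (inds : List (List Char)) (first : List Char) (i : Nat) : Nat :=
  if h : i < first.length ∧
      inds.all (fun ind => decide (i < ind.length) && (ind.getD i ' ' == first.getD i ' ')) then
    pvColScan inds first (i + 1)
  else i
termination_by first.length - i
decreasing_by omega

def common_indent_py_alt (text : String) : String :=
  let indents := ((PySem.Str.splitlines text).filter
      (fun line => !(PySem.Str.strip line == ""))).map pvIndentOf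
  match indents with
  | [] => ""
  | first :: rest => String.ofList (first.take (pvColScan (first :: rest) first 0))

-- ===== PRECONDITION & SPEC =====
def Spec_common_indent_py (text : String) (out : String) : Prop := out = common_indent_py_alt text
instance (text : String) (out : String) : Decidable (Spec_common_indent_py text out) := by unfold Spec_common_indent_py; infer_instance

-- ===== CLAIM (what is proved, stated in full; the proofs are below) =====
def Claim_equal_common_indent_py : Prop := ∀ (text : String), Dom_common_indent_py text → Spec_common_indent_py text (common_indent_py text)

-- ===== LEMMAS AND PROOFS =====

-- length of the longest common prefix of two char lists
def pvLcpLen : List Char → List Char → Nat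
  | a :: as, b :: bs => if a = b then pvLcpLen as bs + 1 else 0
  | _, _ => 0

-- running minimum of pvLcpLen p over a list, seeded with k
def pvMins (p : List Char) (inds : List (List Char)) (k : Nat) : Nat :=
  inds.foldr (fun ind m => min (pvLcpLen p ind) m) k

theorem pvLcpLen_le_left (a b : List Char) : pvLcpLen a b ≤ a.length := by
  induction a generalizing b with
  | nil => simp [pvLcpLen]
  | cons x as ih =>
    cases b with
    | nil => simp [pvLcpLen]
    | cons y bs =>
      simp only [pvLcpLen]
      split
      · simpa using ih bs
      · simp

theorem pvLcpLen_self (a : List Char) : pvLcpLen a a = a.length := by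
  induction a with
  | nil => rfl
  | cons x as ih => simp [pvLcpLen, ih]

theorem pvLcpLen_take (a b : List Char) (k : Nat) :
    pvLcpLen (a.take k) b = min k (pvLcpLen a b) := by
  induction a generalizing b k with
  | nil => simp [pvLcpLen]
  | cons x as ih =>
    cases k with
    | zero => simp [pvLcpLen]
    | succ k =>
      cases b with
      | nil => simp [pvLcpLen]
      | cons y bs =>
        simp only [List.take, pvLcpLen]
        split
        · rw [ih bs k]; omega
        · simp

theorem pvLcpLen_eq_len_iff (a b : List Char) : pvLcpLen a b = a.length ↔ a <+: b := by
  induction a generalizing b with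
  | nil => simp [pvLcpLen]
  | cons x as ih =>
    cases b with
    | nil =>
      simp only [pvLcpLen, List.length_cons]
      constructor
      · intro h; omega
      · intro h; exact absurd (List.IsPrefix.length_le h) (by simp)
    | cons y bs =>
      simp only [pvLcpLen, List.length_cons, List.cons_prefix_cons]
      split
      · rename_i hxy
        constructor
        · intro h; exact ⟨hxy, (ih bs).1 (by omega)⟩
        · intro h; rw [(ih bs).2 h.2]
      · rename_i hxy
        constructor
        · intro h; have := pvLcpLen_le_left as bs; omega
        · intro h; exact absurd h.1 hxy

theorem pvShrink_eq (pfx ind : List Char) : pvShrink pfx ind = pfx.take (pvLcpLen pfx ind) := by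
  have H : ∀ n pfx, pfx.length ≤ n → ∀ ind : List Char,
      pvShrink pfx ind = pfx.take (pvLcpLen pfx ind) := by
    intro n
    induction n with
    | zero =>
      intro pfx hn ind
      have : pfx = [] := List.eq_nil_of_length_eq_zero (by omega)
      subst this
      rw [pvShrink]
      simp
    | succ n ih =>
      intro pfx hn ind
      rw [pvShrink]
      split
      · rename_i h
        have hne := h.1
        have hnp : ¬ pfx <+: ind := by
          intro hp; exact h.2 (List.isPrefixOf_iff_prefix.2 hp)
        have hlt : pvLcpLen pfx ind < pfx.length := by
          have hle := pvLcpLen_le_left pfx ind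
          rcases Nat.lt_or_ge (pvLcpLen pfx ind) pfx.length with h' | h'
          · exact h'
          · exact absurd ((pvLcpLen_eq_len_iff pfx ind).1 (by omega)) hnp
        have hlen0 : 0 < pfx.length := by
          cases pfx with
          | nil => exact absurd rfl hne
          | cons a as => simp
        rw [ih pfx.dropLast (by rw [List.length_dropLast]; omega) ind]
        rw [List.dropLast_eq_take, pvLcpLen_take, List.take_take]
        have h1 : min (pfx.length - 1) (pvLcpLen pfx ind) = pvLcpLen pfx ind := by omega
        rw [h1]
        congr 1
        omega
      · rename_i h
        rcases Decidable.not_and_iff_not_or_not.1 h with h1 | h1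
        · have : pfx = [] := by by_contra hc; exact h1 hc
          subst this; simp
        · have hp : pfx <+: ind := List.isPrefixOf_iff_prefix.1 (by
            by_contra hc
            exact h1 (by simpa using hc))
          rw [(pvLcpLen_eq_len_iff pfx ind).2 hp, List.take_length]
  exact H pfx.length pfx le_rfl ind

theorem pvMins_le (p : List Char) (inds : List (List Char)) (k : Nat) : pvMins p inds k ≤ k := by
  induction inds with
  | nil => simp [pvMins]
  | cons ind rest ih => simp only [pvMins, List.foldr] at *; omega

theorem pvMins_minr (p : List Char) (inds : List (List Char)) (a k : Nat) :
    pvMins p inds (min a k) = min a (pvMins p inds k) := by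
  induction inds with
  | nil => simp [pvMins]
  | cons ind rest ih => simp only [pvMins, List.foldr] at *; omega

theorem lt_pvMins (p : List Char) (inds : List (List Char)) (k i : Nat) :
    i < pvMins p inds k ↔ i < k ∧ ∀ b ∈ inds, i < pvLcpLen p b := by
  induction inds with
  | nil => simp [pvMins]
  | cons ind rest ih =>
    simp only [pvMins, List.foldr, List.mem_cons] at *
    constructor
    · intro h
      have h1 : i < pvLcpLen p ind := by omega
      have h2 := ih.1 (by omega)
      exact ⟨h2.1, by rintro b (rfl | hb); exact h1; exact h2.2 b hb⟩
    · rintro ⟨hk, hall⟩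
      have := ih.2 ⟨hk, fun b hb => hall b (Or.inr hb)⟩
      have := hall ind (Or.inl rfl)
      omega

theorem lt_lcp_imp (a b : List Char) (i : Nat) (h : i < pvLcpLen a b) :
    i < a.length ∧ i < b.length ∧ b.getD i ' ' = a.getD i ' ' := by
  induction a generalizing b i with
  | nil => simp [pvLcpLen] at h
  | cons x as ih =>
    cases b with
    | nil => simp [pvLcpLen] at h
    | cons y bs =>
      simp only [pvLcpLen] at h
      split at h
      · rename_i hxy
        cases i with
        | zero => simp [List.getD, hxy]
        | succ i =>
          have := ih bs i (by omega)
          simp only [List.length_cons, List.getD_cons_succ]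
          exact ⟨by omega, by omega, this.2.2⟩
      · omega

theorem lcp_lt_of (a b : List Char) (i : Nat) (hle : i ≤ pvLcpLen a b)
    (ha : i < a.length) (hb : i < b.length) (he : b.getD i ' ' = a.getD i ' ') :
    i < pvLcpLen a b := by
  induction a generalizing b i with
  | nil => simp at ha
  | cons x as ih =>
    cases b with
    | nil => simp at hb
    | cons y bs =>
      simp only [pvLcpLen] at hle ⊢
      cases i with
      | zero =>
        simp only [List.getD_cons_zero] at he
        subst he
        simp
      | succ i =>
        split at hle
        · rename_i hxy
          rw [if_pos hxy]
          have := ih bs i (by omega) (by simpa using ha) (by simpa using hb)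
            (by simpa using he)
          omega
        · omega

theorem pvAFold_take (p : List Char) (inds : List (List Char)) (k : Nat) :
    pvAFold (p.take k) inds = p.take (pvMins p inds k) := by
  induction inds generalizing k with
  | nil => simp [pvAFold, pvMins]
  | cons ind rest ih =>
    have hshr : pvShrink (p.take k) ind = p.take (min k (pvLcpLen p ind)) := by
      rw [pvShrink_eq, pvLcpLen_take, List.take_take]
      congr 1
      omega
    simp only [pvAFold, hshr]
    have hmins : pvMins p (ind :: rest) k = min (pvLcpLen p ind) (pvMins p rest k) := rfl
    split
    · rename_i hemp
      rw [hmins, hemp]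
      rw [List.take_eq_nil_iff] at hemp
      have hm := pvMins_le p rest k
      rcases hemp with h0 | h0
      · have hz : min (pvLcpLen p ind) (pvMins p rest k) = 0 := by omega
        rw [hz]
        simp
      · simp [h0]
    · rw [ih (min k (pvLcpLen p ind)), hmins]
      congr 1
      rw [Nat.min_comm k (pvLcpLen p ind), pvMins_minr]

theorem le_pvMins (p : List Char) (inds : List (List Char)) (k i : Nat)
    (hk : i ≤ k) (hall : ∀ b ∈ inds, i ≤ pvLcpLen p b) : i ≤ pvMins p inds k := by
  induction inds with
  | nil => simpa [pvMins]
  | cons ind rest ih =>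
    have h1 := hall ind (List.mem_cons_self ..)
    have h2 := ih (fun b hb => hall b (List.mem_cons_of_mem _ hb))
    simp only [pvMins, List.foldr] at *
    omega

theorem pvColScan_eq (inds : List (List Char)) (first : List Char) :
    ∀ i, i ≤ first.length → (∀ b ∈ inds, i ≤ pvLcpLen first b) →
    pvColScan inds first i = pvMins first inds first.length := by
  have H : ∀ n i, first.length - i ≤ n → i ≤ first.length →
      (∀ b ∈ inds, i ≤ pvLcpLen first b) →
      pvColScan inds first i = pvMins first inds first.length := by
    intro n
    induction n with
    | zero =>
      intro i hn hf hall
      have hi : i = first.length := by omega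
      rw [pvColScan]
      rw [dif_neg (by intro h; omega)]
      have hle := le_pvMins first inds first.length i hf hall
      have hge := pvMins_le first inds first.length
      omega
    | succ n ih =>
      intro i hn hf hall
      rw [pvColScan]
      split
      · rename_i h
        apply ih (i + 1) (by omega) (by omega)
        intro b hb
        have hb1 := List.all_eq_true.1 h.2 b hb
        simp only [Bool.and_eq_true, decide_eq_true_eq, beq_iff_eq] at hb1
        have := lcp_lt_of first b i (hall b hb) h.1 hb1.1 hb1.2
        omega
      · rename_i h
        have hle := le_pvMins first inds first.length i hf hall
        have hnlt : ¬ i < pvMins first inds first.length := by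
          intro hlt
          apply h
          rw [lt_pvMins] at hlt
          refine ⟨hlt.1, List.all_eq_true.2 ?_⟩
          intro b hb
          have := lt_lcp_imp first b i (hlt.2 b hb)
          simp only [Bool.and_eq_true, decide_eq_true_eq, beq_iff_eq]
          exact ⟨this.2.1, this.2.2⟩
        omega
  intro i hf hall
  exact H (first.length - i) i le_rfl hf hall

-- the two preprocessing shapes build the same indents list
theorem indents_eq (lines : List String) :
    lines.foldl (fun acc line => if PySem.Str.strip line == "" then acc else acc ++ [pvIndentOf line]) []
      = (lines.filter (fun line => !(PySem.Str.strip line == ""))).map pvIndentOf := by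
  have h : (fun (acc : List (List Char)) line =>
      if PySem.Str.strip line == "" then acc else acc ++ [pvIndentOf line])
      = (fun acc line => if !(PySem.Str.strip line == "") then acc ++ [pvIndentOf line] else acc) := by
    funext acc line
    by_cases hx : PySem.Str.strip line == ""
    · simp [hx]
    · simp [hx]
  rw [h, PySem.List.foldl_append_if]
  simp

-- ===== VERDICT (by name: the statement is the Claim_ definition above) =====
theorem common_indent_py_spec : Claim_equal_common_indent_py := by
  intro text _
  unfold Spec_common_indent_py common_indent_py common_indent_py_alt
  rw [indents_eq]
  cases hind : (List.filter (fun line => !(PySem.Str.strip line == "")) (PySem.Str.splitlines text)).map pvIndentOf with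
  | nil => rfl
  | cons first rest =>
    simp only []
    congr 1
    have hA : pvAFold first rest = first.take (pvMins first rest first.length) := by
      have := pvAFold_take first rest first.length
      rwa [List.take_length] at this
    have hB : pvColScan (first :: rest) first 0 = pvMins first rest first.length := by
      rw [pvColScan_eq (first :: rest) first 0 (by omega) (fun b _ => by omega)]
      show min (pvLcpLen first first) (pvMins first rest first.length) = _
      have h1 := pvLcpLen_self first
      have h2 := pvMins_le first rest first.length
      omega
    rw [hA, hB]
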